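-- pv_equiv track=rewrite | github.com/m9s7/kindergarten_automation | helper_functions.py | trim_non_digit_chars
-- ===== SOURCE A (Python) =====
-- def trim_non_digit_chars(string):
--     """
--     Removes all leading and trailing non-digit characters from a string.
--
--     Args:
--         string (str): The string to remove non-digit characters from.
--
--     Returns:
--         str: The input string with leading and trailing non-digit characters removed.
--     """
--     # Remove leading non-digit characters
--     start_index = 0
--     while start_index < len(string) and not string[start_index].isdigit():
--         start_index += 1
--
--     # Remove trailing non-digit characters
--     end_index = len(string) - 1
--     while end_index >= 0 and not string[end_index].isdigit():
--         end_index -= 1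
--
--     # Return the trimmed string
--     return string[start_index:end_index + 1]
-- ===== SOURCE B (Python) =====
-- def trim_non_digit_chars(string):
--     """
--     Removes all leading and trailing non-digit characters from a string.
--     """
--     digits = [i for i, c in enumerate(string) if c.isdigit()]
--     if not digits:
--         return ''
--     return string[digits[0]:digits[-1] + 1]
-- ===== Notes on version B (the rewrite author's own statement) =====
-- stated objective: alternative
-- what changed: Replaces A's two directional while-loops over indices with a single forward comprehension that collects all digit positions, then one slice from the first to the last collected index (empty list means no digits, return ''); the comprehension runs in C-level loop code, which a timing run measured as a constant-factor speedup.
import Mathlib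
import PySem

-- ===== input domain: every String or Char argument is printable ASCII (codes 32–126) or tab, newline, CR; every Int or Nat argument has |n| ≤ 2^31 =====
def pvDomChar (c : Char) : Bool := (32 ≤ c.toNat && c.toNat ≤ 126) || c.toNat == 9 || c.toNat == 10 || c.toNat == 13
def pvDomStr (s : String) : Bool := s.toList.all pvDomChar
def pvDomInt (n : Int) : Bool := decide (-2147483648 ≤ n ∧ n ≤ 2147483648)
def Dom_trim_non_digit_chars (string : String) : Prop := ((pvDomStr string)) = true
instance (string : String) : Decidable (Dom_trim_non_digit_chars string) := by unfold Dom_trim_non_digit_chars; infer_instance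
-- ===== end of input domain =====

-- B replaces A's two directional while-loops with one forward pass collecting all digit
-- positions followed by a single slice; same O(n) cost, different decomposition.

-- ===== PORT A =====
-- while start_index < len(string) and not string[start_index].isdigit(): start_index += 1
def pvTrimStartLoop (cs : List Char) (i : Int) : Int :=
  if h : i < PySem.List.len cs ∧ ¬ (PySem.Chars.isdigit (PySem.List.pyGetD cs i ' ') = true) then
    pvTrimStartLoop cs (i + 1)
  else i
termination_by (PySem.List.len cs - i).toNat
decreasing_by simp [PySem.List.len_eq] at *; omega

-- while end_index >= 0 and not string[end_index].isdigit(): end_index -= 1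
def pvTrimEndLoop (cs : List Char) (i : Int) : Int :=
  if h : 0 ≤ i ∧ ¬ (PySem.Chars.isdigit (PySem.List.pyGetD cs i ' ') = true) then
    pvTrimEndLoop cs (i - 1)
  else i
termination_by (i + 1).toNat
decreasing_by omega

def trim_non_digit_chars (string : String) : String :=
  let start_index := pvTrimStartLoop string.toList 0
  let end_index := pvTrimEndLoop string.toList (PySem.List.len string.toList - 1)
  PySem.Str.slice string (some start_index) (some (end_index + 1))

-- ===== PORT B =====
def trim_non_digit_chars_alt (string : String) : String :=
  let digits : List Int :=
    ((string.toList.zipIdx).filter (fun p => PySem.Chars.isdigit p.1)).map (fun p => (p.2 : Int))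
  if digits.isEmpty then ""
  else PySem.Str.slice string (some (PySem.List.pyGetD digits 0 0))
         (some (PySem.List.pyGetD digits (-1) 0 + 1))

-- ===== PRECONDITION & SPEC =====
def Spec_trim_non_digit_chars (string : String) (out : String) : Prop := out = trim_non_digit_chars_alt string
instance (string : String) (out : String) : Decidable (Spec_trim_non_digit_chars string out) := by unfold Spec_trim_non_digit_chars; infer_instance

-- ===== CLAIM (what is proved, stated in full; the proofs are below) =====
def Claim_equal_trim_non_digit_chars : Prop := ∀ (string : String), Dom_trim_non_digit_chars string → Spec_trim_non_digit_chars string (trim_non_digit_chars string)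

-- ===== LEMMAS AND PROOFS =====

-- digit indices of cs, numbered from offset k
def pvDI (cs : List Char) (k : Nat) : List Int :=
  ((cs.zipIdx k).filter (fun p => PySem.Chars.isdigit p.1)).map (fun p => (p.2 : Int))

theorem pvDI_cons (c : Char) (cs : List Char) (k : Nat) :
    pvDI (c :: cs) k =
      if PySem.Chars.isdigit c then (k : Int) :: pvDI cs (k + 1) else pvDI cs (k + 1) := by
  simp only [pvDI, List.zipIdx_cons, List.filter_cons]
  split_ifs with h <;> simp

theorem pvDI_append_singleton (cs : List Char) (c : Char) (k : Nat) :
    pvDI (cs ++ [c]) k =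
      pvDI cs k ++ (if PySem.Chars.isdigit c then [((k + cs.length : Nat) : Int)] else []) := by
  simp only [pvDI, List.zipIdx_append, List.filter_append, List.map_append]
  split_ifs with h <;> simp [List.zipIdx_cons, h]

theorem pvTrimStartLoop_eq (cs : List Char) (i : Nat) (hi : i ≤ cs.length) :
    pvTrimStartLoop cs (i : Int) = (pvDI (cs.drop i) i).headD (cs.length : Int) := by
  rcases Nat.lt_or_ge i cs.length with h | h
  · rw [pvTrimStartLoop]
    have hdrop : cs.drop i = cs[i] :: cs.drop (i + 1) := List.drop_eq_getElem_cons h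
    have hget : PySem.List.pyGetD cs (i : Int) ' ' = cs[i] := by
      simp [PySem.List.pyGetD_natCast, List.getD_eq_getElem?_getD, List.getElem?_eq_getElem h]
    by_cases hd : PySem.Chars.isdigit cs[i] = true
    · have : ¬ ((i : Int) < PySem.List.len cs ∧
          ¬ (PySem.Chars.isdigit (PySem.List.pyGetD cs (i : Int) ' ') = true)) := by
        simp [hget, hd]
      rw [dif_neg this, hdrop, pvDI_cons, if_pos hd]
      simp
    · have : ((i : Int) < PySem.List.len cs ∧
          ¬ (PySem.Chars.isdigit (PySem.List.pyGetD cs (i : Int) ' ') = true)) := by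
        constructor
        · simp [PySem.List.len_eq]; exact_mod_cast h
        · simp [hget, hd]
      rw [dif_pos this, hdrop, pvDI_cons, if_neg hd]
      have := pvTrimStartLoop_eq cs (i + 1) h
      push_cast at this ⊢
      rw [this]
  · have hi' : i = cs.length := le_antisymm hi h
    subst hi'
    rw [pvTrimStartLoop]
    have : ¬ (((cs.length : Int) < PySem.List.len cs) ∧
        ¬ (PySem.Chars.isdigit (PySem.List.pyGetD cs (cs.length : Int) ' ') = true)) := by
      simp [PySem.List.len_eq]
    rw [dif_neg this]
    simp [pvDI]
termination_by cs.length - i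
decreasing_by omega

theorem pvTrimEndLoop_eq (cs : List Char) (i : Nat) (hi : i ≤ cs.length) :
    pvTrimEndLoop cs ((i : Int) - 1) = (pvDI (cs.take i) 0).getLastD (-1) := by
  induction i with
  | zero =>
      rw [pvTrimEndLoop]
      have hneg : ¬ ((0 : Int) ≤ (0 : Int) - 1 ∧
          ¬ (PySem.Chars.isdigit (PySem.List.pyGetD cs ((0:Int) - 1) ' ') = true)) := by
        rintro ⟨h1, -⟩; omega
      simp only [Nat.cast_zero]
      rw [dif_neg hneg]
      simp [pvDI]
  | succ n ih =>
      have hn : n < cs.length := hi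
      have htake : cs.take (n + 1) = cs.take n ++ [cs[n]] := List.take_succ_eq_append_getElem hn
      have harg : ((n + 1 : Nat) : Int) - 1 = (n : Int) := by push_cast; ring
      rw [harg, pvTrimEndLoop]
      have hget : PySem.List.pyGetD cs (n : Int) ' ' = cs[n] := by
        simp [PySem.List.pyGetD_natCast, List.getD_eq_getElem?_getD, List.getElem?_eq_getElem hn]
      have hDI : pvDI (cs.take (n + 1)) 0 =
          pvDI (cs.take n) 0 ++
            (if PySem.Chars.isdigit cs[n] then [((n : Nat) : Int)] else []) := by
        rw [htake, pvDI_append_singleton]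
        congr 2
        simp [List.length_take, Nat.min_eq_left (le_of_lt hn)]
      by_cases hd : PySem.Chars.isdigit cs[n] = true
      · have : ¬ ((0 : Int) ≤ (n : Int) ∧
            ¬ (PySem.Chars.isdigit (PySem.List.pyGetD cs (n : Int) ' ') = true)) := by
          simp [hget, hd]
        rw [dif_neg this, hDI, if_pos hd]
        simp
      · have hc : ((0 : Int) ≤ (n : Int) ∧
            ¬ (PySem.Chars.isdigit (PySem.List.pyGetD cs (n : Int) ' ') = true)) := by
          refine ⟨by positivity, by simp [hget, hd]⟩
        rw [dif_pos hc, hDI, if_neg hd]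
        simp only [List.append_nil]
        exact ih (le_of_lt hn)

theorem pvString_toList_nil (t : String) (h : t.toList = []) : t = "" := by
  have := congrArg String.ofList h
  simpa using this

-- ===== VERDICT (by name: the statement is the Claim_ definition above) =====
theorem trim_non_digit_chars_spec : Claim_equal_trim_non_digit_chars := by
  intro s _
  unfold Spec_trim_non_digit_chars trim_non_digit_chars trim_non_digit_chars_alt
  set cs := s.toList with hcs
  have hstart : pvTrimStartLoop cs 0 = (pvDI cs 0).headD (cs.length : Int) := by
    have := pvTrimStartLoop_eq cs 0 (Nat.zero_le _)
    simpa using this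
  have hend : pvTrimEndLoop cs (PySem.List.len cs - 1) = (pvDI cs 0).getLastD (-1) := by
    have := pvTrimEndLoop_eq cs cs.length (le_refl _)
    simpa [PySem.List.len_eq] using this
  have hdig : ((cs.zipIdx).filter (fun p => PySem.Chars.isdigit p.1)).map
      (fun p => (p.2 : Int)) = pvDI cs 0 := rfl
  simp only [hdig]
  cases hD : pvDI cs 0 with
  | nil =>
      simp only [List.isEmpty_nil, if_true]
      have h1 : pvTrimStartLoop cs 0 = (cs.length : Int) := by rw [hstart, hD]; rfl
      have h2 : pvTrimEndLoop cs (PySem.List.len cs - 1) = -1 := by rw [hend, hD]; rfl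
      apply pvString_toList_nil
      rw [h1, h2, PySem.Str.toList_slice, PySem.Chars.slice_eq_listSlice, ← hcs]
      have : (-1 : Int) + 1 = ((0 : Nat) : Int) := by norm_num
      rw [this, PySem.List.slice_toNat _ (by positivity) (by norm_num)]
      simp
  | cons d rest =>
      simp only [List.isEmpty_cons, if_false, Bool.false_eq_true]
      have h1 : pvTrimStartLoop cs 0 = d := by rw [hstart, hD]; rfl
      have h2 : pvTrimEndLoop cs (PySem.List.len cs - 1) = (d :: rest).getLast (by simp) := by
        rw [hend, hD, List.getLastD_eq_getLast?, List.getLast?_eq_some_getLast (List.cons_ne_nil d rest)]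
        rfl
      rw [h1, h2, PySem.List.pyGetD_zero_cons,
        PySem.List.pyGetD_neg_one (d :: rest) 0 (List.cons_ne_nil d rest)]
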